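-- pv_equiv track=rewrite | github.com/DaDaDiRaRa/dwg-checker-main | app.py | _merge_title_char_runs
-- ===== SOURCE A (Python) =====
-- def _merge_title_char_runs(s: str) -> str:
--     """Merge space-separated single-char tokens in title strings (char-by-char CAD storage)."""
--     if not s: return ""
--     result_parts = []
--     run = []
--     for tok in s.split(" "):
--         if tok and len(tok) == 1:
--             run.append(tok)
--         else:
--             if run:
--                 merged = "".join(run)
--                 # Attach separator-leading runs directly to previous word (e.g. "-12" -> "근거-12")
--                 if result_parts and (merged[0] in "-_~" or result_parts[-1][-1:] in "-_~"):
--                     result_parts[-1] += merged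
--                 else:
--                     result_parts.append(merged)
--                 run = []
--             if tok:
--                 result_parts.append(tok)
--     if run:
--         merged = "".join(run)
--         if result_parts and (merged[0] in "-_~" or result_parts[-1][-1:] in "-_~"):
--             result_parts[-1] += merged
--         else:
--             result_parts.append(merged)
--     return " ".join(result_parts)
-- ===== SOURCE B (Python) =====
-- def _merge_title_char_runs(s: str) -> str:
--     """Merge space-separated single-char tokens in title strings (char-by-char CAD storage)."""
--     if not s:
--         return ""
--     toks = s.split(" ")
--     result = []
--     i, n = 0, len(toks)
--     while i < n:
--         t = toks[i]
--         if len(t) == 1: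
--             # scan the whole maximal run of single-char tokens at once
--             j = i + 1
--             while j < n and len(toks[j]) == 1:
--                 j += 1
--             merged = "".join(toks[i:j])
--             if result and (merged[0] in "-_~" or result[-1][-1:] in "-_~"):
--                 result[-1] += merged
--             else:
--                 result.append(merged)
--             i = j
--         else:
--             if t:
--                 result.append(t)
--             i += 1
--     return " ".join(result)
-- ===== Notes on version B (the rewrite author's own statement) =====
-- stated objective: alternative
-- what changed: Replaces A's single fold with a (result, run) accumulator state and a duplicated post-loop flush by an index scan over the token list that consumes each maximal run of single-char tokens at once (inner while + slice join), so there is no pending-run state and no flush code at all.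
import Mathlib
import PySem

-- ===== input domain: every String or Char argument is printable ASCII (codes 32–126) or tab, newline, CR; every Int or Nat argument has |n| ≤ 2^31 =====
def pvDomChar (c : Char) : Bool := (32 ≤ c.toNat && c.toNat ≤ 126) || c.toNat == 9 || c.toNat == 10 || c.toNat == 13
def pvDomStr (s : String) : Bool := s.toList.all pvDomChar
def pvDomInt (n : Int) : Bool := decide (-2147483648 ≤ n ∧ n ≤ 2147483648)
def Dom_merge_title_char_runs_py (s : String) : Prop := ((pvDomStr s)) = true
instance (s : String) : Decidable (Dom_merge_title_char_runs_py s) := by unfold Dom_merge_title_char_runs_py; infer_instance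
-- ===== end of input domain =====

-- B replaces A's interleaved loop with a (result, run) accumulator and a duplicated post-loop
-- flush by an index scan that consumes each maximal single-char run at once; alternative
-- decomposition of the same O(n) task, no speed claim.

-- ===== PORT A =====
-- A's attach-or-append lines:
-- if result and (merged[0] in "-_~" or result[-1][-1:] in "-_~"): result[-1] += merged else: result.append(merged)
def pvAttach (result : List String) (merged : String) : List String :=
  if !result.isEmpty &&
      ((match PySem.Str.pyGet? merged 0 with
        | some c => PySem.Str.isIn (String.ofList [c]) "-_~"
        | none => false)   -- unreachable: merged is a joined nonempty run at every call site
       || PySem.Str.isIn (PySem.Str.slice ((result.getLast?).getD "") (some (-1)) none) "-_~")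
  then result.dropLast ++ [((result.getLast?).getD "") ++ merged]
  else result ++ [merged]

-- Source A's "if run: ... flush ..." block (it appears verbatim twice in Source A: in the loop and after it)
def pvFlushA (st : List String × List String) : List String :=
  if st.2 ≠ [] then pvAttach st.1 (PySem.Str.join "" st.2) else st.1

-- A's loop body: state = (result_parts, run)
def pvStepA (st : List String × List String) (tok : String) : List String × List String :=
  if tok ≠ "" ∧ PySem.Str.len tok = 1 then (st.1, st.2 ++ [tok])
  else
    let r := pvFlushA st
    (if tok ≠ "" then r ++ [tok] else r, [])

def merge_title_char_runs_py (s : String) : String :=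
  if s = "" then "" else
    -- s.split(" "): the separator " " is nonempty, so split? is always `some`
    let toks := (PySem.Str.split? s " ").getD []
    PySem.Str.join " " (pvFlushA (toks.foldl pvStepA ([], [])))

-- ===== PORT B =====
-- "len(toks[j]) == 1", the run predicate B's two index tests use
def pvSingle (t : String) : Bool := PySem.Str.len t == 1

-- B's attach-or-append lines, driven by the last element of result ("result and ... result[-1] ...")
def pvAttachB (result : List String) (merged : String) : List String :=
  match result.getLast? with
  | none => [merged]
  | some prev =>
    if (merged.toList.head?.map (fun c => ['-', '_', '~'].contains c)).getD false  -- merged[0]; nonempty at every call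
        || PySem.Str.isIn (PySem.Str.slice prev (some (-1)) none) "-_~"
    then result.dropLast ++ [prev ++ merged]
    else result ++ [merged]

-- B's outer while loop over the index i, as recursion on the remaining tokens; the inner
-- "while j < n and len(toks[j]) == 1" scan and toks[i:j] are takeWhile/dropWhile of the run predicate
def pvMergeB (result : List String) : List String → List String
  | [] => result
  | t :: rest =>
    if pvSingle t then
      pvMergeB (pvAttachB result (PySem.Str.join "" (t :: rest.takeWhile pvSingle)))
        (rest.dropWhile pvSingle)
    else
      pvMergeB (if t ≠ "" then result ++ [t] else result) rest
  termination_by toks => toks.length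
  decreasing_by
  · have := List.length_dropWhile_le pvSingle rest; simp; omega
  · simp

def merge_title_char_runs_py_alt (s : String) : String :=
  if s = "" then "" else
    let toks := (PySem.Str.split? s " ").getD []
    PySem.Str.join " " (pvMergeB [] toks)

-- ===== PRECONDITION & SPEC =====
def Spec_merge_title_char_runs_py (s : String) (out : String) : Prop := out = merge_title_char_runs_py_alt s
instance (s : String) (out : String) : Decidable (Spec_merge_title_char_runs_py s out) := by unfold Spec_merge_title_char_runs_py; infer_instance

-- ===== CLAIM =====
def Claim_equal_merge_title_char_runs_py : Prop := ∀ (s : String), Dom_merge_title_char_runs_py s → Spec_merge_title_char_runs_py s (merge_title_char_runs_py s)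

-- ===== LEMMAS AND PROOFS =====

theorem pv_sep_singleton (c : Char) :
    PySem.Chars.isIn [c] ['-', '_', '~'] = ['-', '_', '~'].contains c := by
  rw [Bool.eq_iff_iff, PySem.Chars.isIn_iff_infix, List.singleton_infix_iff]; simp

theorem pv_head_pyGet (merged : String) : PySem.Str.pyGet? merged 0 = merged.toList.head? := by
  cases h : merged.toList with
  | nil => simp [h]; rfl
  | cons c cs => simp [h]

-- the two attach helpers agree on every state
theorem pv_attach_eq (result : List String) (merged : String) :
    pvAttach result merged = pvAttachB result merged := by
  rcases List.eq_nil_or_concat result with h | ⟨res, prev, h⟩ <;> subst h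
  · simp [pvAttach, pvAttachB]
  · have hhd : (match PySem.Str.pyGet? merged 0 with
        | some c => PySem.Str.isIn (String.ofList [c]) "-_~"
        | none => false)
        = (merged.toList.head?.map (fun c => ['-', '_', '~'].contains c)).getD false := by
      rw [pv_head_pyGet]
      cases merged.toList.head? with
      | none => rfl
      | some c => simpa using pv_sep_singleton c
    simp only [pvAttach, pvAttachB, List.concat_eq_append, List.getLast?_concat,
      Option.getD_some, hhd]
    split_ifs with hA hB hB <;> simp_all

-- A's loop only appends to the pending run while the tokens are single chars
theorem pv_accumulate (ts : List String) (res run : List String)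
    (h : ∀ t ∈ ts, pvSingle t = true) :
    ts.foldl pvStepA (res, run) = (res, run ++ ts) := by
  induction ts generalizing run with
  | nil => simp
  | cons t ts ih =>
    have h1' : t.length = 1 := by simpa [pvSingle, PySem.Str.len_eq] using h t (by simp)
    have hne : t ≠ "" := by intro he; subst he; simp at h1'
    have hstep : pvStepA (res, run) t = (res, run ++ [t]) := by
      simp [pvStepA, PySem.Str.len_eq, h1', hne]
    rw [List.foldl_cons, hstep, ih (run ++ [t]) (fun x hx => h x (List.mem_cons_of_mem _ hx))]
    simp

-- main invariant: A's flushed fold = B's run-scanning recursion, at any intermediate result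
theorem pv_main (n : Nat) : ∀ (toks : List String), toks.length ≤ n → ∀ (result : List String),
    pvFlushA (toks.foldl pvStepA (result, [])) = pvMergeB result toks := by
  induction n with
  | zero =>
    intro toks h result
    rw [List.length_eq_zero_iff.mp (Nat.le_zero.mp h)]
    simp [pvFlushA, pvMergeB]
  | succ m ih =>
    intro toks hlen result
    match toks with
    | [] => simp [pvFlushA, pvMergeB]
    | t :: rest =>
      by_cases h1 : PySem.Str.len t = 1
      · have h1' : t.length = 1 := by simpa [PySem.Str.len_eq] using h1
        have hne : t ≠ "" := by intro he; subst he; simp at h1'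
        have hs : pvSingle t = true := by simp [pvSingle, PySem.Str.len_eq, h1']
        have hstep : pvStepA (result, []) t = (result, [t]) := by
          simp [pvStepA, PySem.Str.len_eq, h1', hne]
        have hacc : (rest.takeWhile pvSingle).foldl pvStepA (result, [t])
            = (result, t :: rest.takeWhile pvSingle) := by
          have := pv_accumulate (rest.takeWhile pvSingle) result [t]
            (fun x hx => List.mem_takeWhile_imp hx)
          simpa using this
        have hfold : (t :: rest).foldl pvStepA (result, [])
            = (rest.dropWhile pvSingle).foldl pvStepA (result, t :: rest.takeWhile pvSingle) := by
          conv_lhs => rw [List.foldl_cons, hstep,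
            ← List.takeWhile_append_dropWhile (p := pvSingle) (l := rest)]
          rw [List.foldl_append, hacc]
        have hB : pvMergeB result (t :: rest)
            = pvMergeB (pvAttachB result (PySem.Str.join "" (t :: rest.takeWhile pvSingle)))
                (rest.dropWhile pvSingle) := by
          rw [pvMergeB]; simp [hs]
        rcases hdweq : rest.dropWhile pvSingle with _ | ⟨u, us⟩
        · rw [hfold, hB, hdweq, List.foldl_nil]
          rw [show pvMergeB (pvAttachB result (PySem.Str.join "" (t :: rest.takeWhile pvSingle))) []
              = pvAttachB result (PySem.Str.join "" (t :: rest.takeWhile pvSingle)) from by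
            rw [pvMergeB]]
          rw [← pv_attach_eq]
          simp [pvFlushA]
        · have hu : pvSingle u = false := by
            have h2 := List.head?_dropWhile_not pvSingle rest
            rw [hdweq] at h2; simpa using h2
          have hu1 : ¬ (u ≠ "" ∧ PySem.Str.len u = 1) := by
            rintro ⟨-, h⟩
            have h' : u.length = 1 := by simpa [PySem.Str.len_eq] using h
            simp [pvSingle, PySem.Str.len_eq, h'] at hu
          have hstep2 : pvStepA (result, t :: rest.takeWhile pvSingle) u
              = (if u ≠ "" then
                  pvAttach result (PySem.Str.join "" (t :: rest.takeWhile pvSingle)) ++ [u]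
                 else pvAttach result (PySem.Str.join "" (t :: rest.takeWhile pvSingle)), []) := by
            rw [pvStepA, if_neg hu1]; simp [pvFlushA]
          have hus : us.length ≤ m := by
            have h2 : (rest.dropWhile pvSingle).length ≤ rest.length :=
              List.length_dropWhile_le _ _
            rw [hdweq] at h2; simp at h2 hlen; omega
          rw [hfold, hB, hdweq, List.foldl_cons, hstep2]
          rw [show pvMergeB (pvAttachB result (PySem.Str.join "" (t :: rest.takeWhile pvSingle)))
                (u :: us)
              = pvMergeB (if u ≠ "" then
                  pvAttachB result (PySem.Str.join "" (t :: rest.takeWhile pvSingle)) ++ [u]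
                 else pvAttachB result (PySem.Str.join "" (t :: rest.takeWhile pvSingle))) us from by
            rw [pvMergeB, if_neg (by simp [hu])]]
          rw [← pv_attach_eq]
          exact ih us hus _
      · have h1' : ¬ t.length = 1 := fun he => h1 (by simp [PySem.Str.len_eq, he])
        have hs : pvSingle t = false := by simp [pvSingle, PySem.Str.len_eq, h1']
        have hrest : rest.length ≤ m := by simp at hlen; omega
        by_cases h0 : t = ""
        · have hstep : pvStepA (result, []) t = (result, []) := by
            simp [pvStepA, h0, pvFlushA]
          rw [List.foldl_cons, hstep, ih rest hrest, pvMergeB, if_neg (by simp [hs]),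
            if_neg (by simp [h0])]
        · have hstep : pvStepA (result, []) t = (result ++ [t], []) := by
            simp [pvStepA, h0, PySem.Str.len_eq, h1', pvFlushA]
          rw [List.foldl_cons, hstep, ih rest hrest, pvMergeB, if_neg (by simp [hs]),
            if_pos h0]

-- ===== VERDICT =====
theorem merge_title_char_runs_py_spec : Claim_equal_merge_title_char_runs_py := by
  intro s _
  unfold Spec_merge_title_char_runs_py merge_title_char_runs_py merge_title_char_runs_py_alt
  by_cases hs : s = ""
  · simp [hs]
  · simp only [hs, ite_false]
    exact congrArg _ (pv_main _ _ le_rfl [])
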